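-- pv_equiv track=rewrite | github.com/bloodsweatengineers/PRO-K | Gen/generate.py | token_table
-- ===== SOURCE A (Python) =====
-- def token_table(token):
--     string = "#ifndef __PRO_K_TOKEN_TABLE_H__\n"
--     string += "#define __PRO_K_TOKEN_TABLE_H__\n\n"
--     index = 0
--     string += "enum tok_t {\n\t"
--     for i in range(0, len(token)):
--         if index == 5:
--             index = 0
--             string += "\n\t"
--         string += "{},".format(token[i])
--         index += 1
--     string += "REJECT"
--     string += "\n};\n\n"
--
--     string += "#endif"
--     return string
-- ===== SOURCE B (Python) =====
-- def token_table(token):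
--     groups = [token[i:i + 5] for i in range(0, len(token), 5)]
--     lines = "\n\t".join("".join("{},".format(t) for t in g) for g in groups)
--     return ("#ifndef __PRO_K_TOKEN_TABLE_H__\n"
--             "#define __PRO_K_TOKEN_TABLE_H__\n\n"
--             "enum tok_t {\n\t" + lines + "REJECT\n};\n\n#endif")
-- ===== Notes on version B (the rewrite author's own statement) =====
-- stated objective: simpler
-- what changed: Replaces the running line-position counter and incremental string += loop with an explicit partition of the token list into slices of five (range with step 5), each slice formatted by a join and the slices joined with the line separator.
import Mathlib
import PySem

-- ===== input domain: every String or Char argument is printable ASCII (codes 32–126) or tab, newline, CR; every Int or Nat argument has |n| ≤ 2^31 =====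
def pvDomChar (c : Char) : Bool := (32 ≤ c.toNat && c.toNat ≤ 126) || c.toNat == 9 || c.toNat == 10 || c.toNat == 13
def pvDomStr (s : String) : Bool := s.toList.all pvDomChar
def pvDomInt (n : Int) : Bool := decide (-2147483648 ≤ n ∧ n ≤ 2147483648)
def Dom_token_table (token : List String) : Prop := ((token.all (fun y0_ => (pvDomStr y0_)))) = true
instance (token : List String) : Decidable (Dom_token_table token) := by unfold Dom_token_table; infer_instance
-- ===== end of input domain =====

-- B replaces A's running line-position counter and incremental appends by an explicit
-- partition of the tokens into chunks of five joined with the line separator (objective: simpler).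


-- ===== PORT A =====
def token_table (token : List String) : String :=
  let string := "#ifndef __PRO_K_TOKEN_TABLE_H__\n"
  let string := string ++ "#define __PRO_K_TOKEN_TABLE_H__\n\n"
  let index : Int := 0
  let string := string ++ "enum tok_t {\n\t"
  -- for i in range(0, len(token)): state (index, string); token[i] is always in range here
  let st := (PySem.List.pyRange 0 (PySem.List.len token) 1).foldl
    (fun (st : Int × String) i =>
      let (index, string) :=
        if st.1 == 5 then ((0 : Int), st.2 ++ "\n\t") else (st.1, st.2)
      (index + 1, string ++ PySem.List.pyGetD token i "" ++ ","))
    (index, string)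
  let string := st.2 ++ "REJECT"
  let string := string ++ "\n};\n\n"
  string ++ "#endif"

-- ===== PORT B =====
def token_table_alt (token : List String) : String :=
  let groups := (PySem.List.pyRange 0 (PySem.List.len token) 5).map
    (fun i => PySem.List.slice token (some i) (some (i + 5)))
  let lines := PySem.Str.join "\n\t"
    (groups.map (fun g => PySem.Str.join "" (g.map (fun t => t ++ ","))))
  "#ifndef __PRO_K_TOKEN_TABLE_H__\n" ++ "#define __PRO_K_TOKEN_TABLE_H__\n\n" ++
    "enum tok_t {\n\t" ++ lines ++ "REJECT\n};\n\n#endif"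

-- ===== PRECONDITION & SPEC =====
def Spec_token_table (token : List String) (out : String) : Prop := out = token_table_alt token
instance (token : List String) (out : String) : Decidable (Spec_token_table token out) := by unfold Spec_token_table; infer_instance

-- ===== CLAIM (what is proved, stated in full; the proofs are below) =====
def Claim_equal_token_table : Prop := ∀ (token : List String), Dom_token_table token → Spec_token_table token (token_table token)

-- ===== LEMMAS AND PROOFS =====

-- the groups token[0:5], token[5:10], … as a structural recursion
def pvChunks5 (l : List String) : List (List String) :=
  if l = [] then [] else l.take 5 :: pvChunks5 (l.drop 5)
termination_by l.length
decreasing_by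
  have : l.length ≠ 0 := by simpa [List.length_eq_zero_iff] using (by assumption : ¬ l = [])
  simp; omega


-- the per-group formatted string "t1,t2,…," (what "".join builds for one group)
def pvFmt : List String → String
  | [] => ""
  | t :: g => t ++ "," ++ pvFmt g

-- the later groups, each preceded by the line separator
def pvTail : List (List String) → String
  | [] => ""
  | g :: gs => "\n\t" ++ pvFmt g ++ pvTail gs

theorem pvChunks5_nil : pvChunks5 [] = [] := by
  rw [pvChunks5]; simp

theorem pvChunks5_cons (t : String) (ts : List String) :
    pvChunks5 (t :: ts) = (t :: ts.take 4) :: pvChunks5 (ts.drop 4) := by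
  rw [pvChunks5]; simp

theorem strJoin_nil (sep : String) : PySem.Str.join sep [] = "" := by
  apply String.toList_inj.mp
  simp [PySem.Str.toList_join, PySem.Chars.join_nil]

theorem strJoin_singleton (sep x : String) : PySem.Str.join sep [x] = x := by
  apply String.toList_inj.mp
  simp [PySem.Str.toList_join, PySem.Chars.join_singleton]

theorem strJoin_cons_cons (sep x y : String) (xs : List String) :
    PySem.Str.join sep (x :: y :: xs) = x ++ sep ++ PySem.Str.join sep (y :: xs) := by
  apply String.toList_inj.mp
  simp only [PySem.Str.toList_join, List.map_cons]
  rw [PySem.Chars.join_cons_cons]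
  simp [PySem.Str.toList_join]

theorem pvFmt_eq_join (g : List String) :
    PySem.Str.join "" (g.map (fun t => t ++ ",")) = pvFmt g := by
  induction g with
  | nil => simpa [pvFmt] using strJoin_nil ""
  | cons t g ih =>
    cases g with
    | nil => simp [pvFmt, strJoin_singleton, String.append_empty]
    | cons u g' =>
      simp only [List.map_cons] at ih ⊢
      rw [strJoin_cons_cons, ih]
      simp [pvFmt, String.append_assoc, String.append_empty]

theorem pvTail_eq_join (cs : List (List String)) :
    PySem.Str.join "\n\t" (cs.map (fun g => PySem.Str.join "" (g.map (fun t => t ++ ",")))) =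
      match cs with
      | [] => ""
      | c :: cs' => pvFmt c ++ pvTail cs' := by
  induction cs with
  | nil => simpa using strJoin_nil "\n\t"
  | cons c cs ih =>
    cases cs with
    | nil => simp [strJoin_singleton, pvFmt_eq_join, pvTail, String.append_empty]
    | cons d cs' =>
      simp only [List.map_cons] at ih ⊢
      rw [strJoin_cons_cons, ih, pvFmt_eq_join]
      simp [pvTail, String.append_assoc]


-- the range-and-slice comprehension of B computes exactly the successive chunks of five
theorem pvAux (K : Nat) : ∀ (l : List String), K = (l.length + 4) / 5 →
    (List.range K).map (fun k => (l.drop (5 * k)).take 5) = pvChunks5 l := by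
  induction K with
  | zero =>
    intro l hK
    have : l.length = 0 := by omega
    have hl : l = [] := by simpa [List.length_eq_zero_iff] using this
    subst hl
    simp [pvChunks5_nil]
  | succ K' ih =>
    intro l hK
    have hlen : 1 ≤ l.length := by omega
    cases l with
    | nil => simp at hlen
    | cons t ts =>
      rw [List.range_succ_eq_map, List.map_cons, List.map_map]
      have hcomp : ((fun k => ((t :: ts).drop (5 * k)).take 5) ∘ Nat.succ)
          = fun k => ((ts.drop 4).drop (5 * k)).take 5 := by
        funext k
        show (((t :: ts).drop (5 * Nat.succ k)).take 5 : List String)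
          = ((ts.drop 4).drop (5 * k)).take 5
        rw [show 5 * Nat.succ k = (5 * k + 4) + 1 by omega, List.drop_succ_cons, List.drop_drop]
        congr 2
        omega
      rw [hcomp, ih (ts.drop 4) (by simp at hK ⊢; omega), pvChunks5_cons]
      simp

theorem pvRangeChunks (l : List String) :
    ((PySem.List.pyRange 0 (PySem.List.len l) 5).map
      (fun i => PySem.List.slice l (some i) (some (i + 5)))) = pvChunks5 l := by
  rw [PySem.List.pyRange_of_pos 0 (PySem.List.len l) (by norm_num), List.map_map]
  have hK : (if (0 : Int) < PySem.List.len l then ((PySem.List.len l - 0 + 5 - 1) / 5).toNat else 0)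
      = (l.length + 4) / 5 := by
    simp only [PySem.List.len_eq]
    split_ifs with h <;> omega
  rw [hK]
  have hcomp : ((fun i => PySem.List.slice l (some i) (some (i + 5))) ∘ fun k : Nat => (0 : Int) + 5 * (k : Int))
      = fun k : Nat => (l.drop (5 * k)).take 5 := by
    funext k
    have h5 : ((0 : Int) + 5 * (k : Int)) = ((5 * k : Nat) : Int) := by push_cast; ring
    have h5' : ((0 : Int) + 5 * (k : Int) + 5) = ((5 * k : Nat) : Int) + ((5 : Nat) : Int) := by push_cast; ring
    simp only [Function.comp, h5]
    exact PySem.List.slice_natCast_add l (5 * k) 5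
  rw [hcomp, pvAux ((l.length + 4) / 5) l rfl]

-- A's loop body, as a fold over the token list itself
def pvStep (st : Int × String) (t : String) : Int × String :=
  let (index, string) := if st.1 == 5 then ((0 : Int), st.2 ++ "\n\t") else (st.1, st.2)
  (index + 1, string ++ t ++ ",")

-- loop invariant: with room for c more tokens on the current line (index = 5 - c, c ≤ 5),
-- A's fold appends the first c tokens then every later chunk of five preceded by "\n\t"
theorem pvLoop_eq (ts : List String) : ∀ (c : Nat) (acc : String), c ≤ 5 →
    (ts.foldl pvStep (((5 : Int) - (c : Nat)), acc)).2 =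
      acc ++ pvFmt (ts.take c) ++ pvTail (pvChunks5 (ts.drop c)) := by
  induction ts with
  | nil =>
    intro c acc _
    cases c <;> simp [pvFmt, pvTail, pvChunks5_nil, String.append_empty]
  | cons t ts ih =>
    intro c acc hc
    match c with
    | 0 =>
      rw [List.foldl_cons]
      have hstep : pvStep (((5 : Int) - ((0 : Nat) : Int)), acc) t
          = (((5 : Int) - ((4 : Nat) : Int)), acc ++ "\n\t" ++ t ++ ",") := by
        simp [pvStep]
      rw [hstep, ih 4 _ (by omega)]
      simp [pvFmt, pvTail, pvChunks5_cons, String.append_assoc, String.append_empty]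
    | Nat.succ c' =>
      rw [List.foldl_cons]
      have hne : (((5 : Int) - ((c' + 1 : Nat) : Int)) == 5) = false := by
        simp; omega
      have hstep : pvStep (((5 : Int) - ((c' + 1 : Nat) : Int)), acc) t
          = (((5 : Int) - ((c' : Nat) : Int)), acc ++ t ++ ",") := by
        simp [pvStep]
        split
        · omega
        · exact ⟨by ring, rfl⟩
      rw [hstep, ih c' _ (by omega)]
      simp [pvFmt, List.take_succ_cons, List.drop_succ_cons, String.append_assoc]

-- merging A's literal suffix appends
theorem pvSuffix (s : String) :
    s ++ "REJECT" ++ "\n};\n\n" ++ "#endif" = s ++ "REJECT\n};\n\n#endif" := by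
  rw [String.append_assoc, String.append_assoc]
  congr 1

theorem token_table_eq_alt (token : List String) : token_table token = token_table_alt token := by
  show (((PySem.List.pyRange 0 (PySem.List.len token) 1).foldl
      (fun (st : Int × String) i =>
        let (index, string) :=
          if st.1 == 5 then ((0 : Int), st.2 ++ "\n\t") else (st.1, st.2)
        (index + 1, string ++ PySem.List.pyGetD token i "" ++ ","))
      ((0 : Int), "#ifndef __PRO_K_TOKEN_TABLE_H__\n" ++ "#define __PRO_K_TOKEN_TABLE_H__\n\n" ++ "enum tok_t {\n\t")).2
      ++ "REJECT" ++ "\n};\n\n" ++ "#endif"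
    = "#ifndef __PRO_K_TOKEN_TABLE_H__\n" ++ "#define __PRO_K_TOKEN_TABLE_H__\n\n" ++ "enum tok_t {\n\t"
      ++ PySem.Str.join "\n\t" (((PySem.List.pyRange 0 (PySem.List.len token) 5).map
            (fun i => PySem.List.slice token (some i) (some (i + 5)))).map
          (fun g => PySem.Str.join "" (g.map (fun t => t ++ ","))))
      ++ "REJECT\n};\n\n#endif")
  rw [pvRangeChunks]
  have hfun : (fun (st : Int × String) i =>
      let (index, string) :=
        if st.1 == 5 then ((0 : Int), st.2 ++ "\n\t") else (st.1, st.2)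
      (index + 1, string ++ PySem.List.pyGetD token i "" ++ ","))
      = (fun acc j => pvStep acc (PySem.List.pyGetD token j "")) := by
    funext st i
    simp [pvStep]
  rw [hfun, PySem.List.foldl_pyRange_zero_pyGetD token "" pvStep,
      show (0 : Int) = (5 : Int) - ((5 : Nat) : Int) from by norm_num,
      pvLoop_eq token 5 _ (by omega), pvTail_eq_join, pvSuffix]
  cases token with
  | nil =>
    simp [pvChunks5_nil, pvFmt, pvTail, String.append_empty]
  | cons t ts =>
    rw [pvChunks5_cons]
    simp [pvFmt, List.take_succ_cons, List.drop_succ_cons, String.append_assoc]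

theorem token_table_spec : Claim_equal_token_table := by
  intro token _
  unfold Spec_token_table
  exact token_table_eq_alt token
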